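-- pv_equiv track=rewrite | github.com/juhyun-hai/Paper-Agents | src/trend_analyzer.py | _summarize_flow_changes
-- ===== SOURCE A (Python) =====
-- from typing import Dict, List, Any, Tuple
--
-- def _summarize_flow_changes(category_changes: Dict) -> str:
--     """연구 흐름 변화 요약"""
--     increasing = [cat for cat, data in category_changes.items()
--                  if data['trend'] == 'increasing']
--     decreasing = [cat for cat, data in category_changes.items()
--                  if data['trend'] == 'decreasing']
--
--     summary_parts = []
--     if increasing:
--         summary_parts.append(f"증가 추세: {', '.join(increasing[:3])}")
--     if decreasing:
--         summary_parts.append(f"감소 추세: {', '.join(decreasing[:3])}")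
--
--     return '; '.join(summary_parts) if summary_parts else "안정적인 연구 분포 유지"
-- ===== SOURCE B (Python) =====
-- def _summarize_flow_changes(category_changes):
--     """Single pass: bucket categories by their trend, then format the two buckets."""
--     groups = {}
--     for cat, data in category_changes.items():
--         groups.setdefault(data['trend'], []).append(cat)
--     summary_parts = []
--     for trend, label in (('increasing', '증가 추세'), ('decreasing', '감소 추세')):
--         cats = groups.get(trend, [])
--         if cats:
--             summary_parts.append(f"{label}: {', '.join(cats[:3])}")
--     return '; '.join(summary_parts) if summary_parts else "안정적인 연구 분포 유지"
-- ===== Notes on version B (the rewrite author's own statement) =====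
-- stated objective: alternative
-- what changed: Replaces A's two filtered scans over the dict with a single bucketing pass into a trend-keyed grouping dict, then formats the two buckets by looping over (trend,label) pairs.
import Mathlib
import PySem

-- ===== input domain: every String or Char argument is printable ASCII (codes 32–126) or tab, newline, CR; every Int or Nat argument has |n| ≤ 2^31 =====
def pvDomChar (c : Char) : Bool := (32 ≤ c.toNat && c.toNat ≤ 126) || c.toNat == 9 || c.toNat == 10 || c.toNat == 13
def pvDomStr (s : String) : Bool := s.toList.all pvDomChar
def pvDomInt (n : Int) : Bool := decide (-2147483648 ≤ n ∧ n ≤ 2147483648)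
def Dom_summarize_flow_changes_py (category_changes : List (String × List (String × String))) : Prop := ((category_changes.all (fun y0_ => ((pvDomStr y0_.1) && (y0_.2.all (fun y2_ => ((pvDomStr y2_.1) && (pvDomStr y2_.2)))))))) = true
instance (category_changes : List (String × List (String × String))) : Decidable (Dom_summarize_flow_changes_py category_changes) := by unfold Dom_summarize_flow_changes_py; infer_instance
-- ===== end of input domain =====

-- B buckets categories by trend in one pass instead of A's two filtered scans; same result (objective: alternative).

-- ===== PORT A =====
def summarize_flow_changes_py (category_changes : List (String × List (String × String))) : String :=
  -- data['trend'] is first-match lookup; KeyError (lookup = none) is excluded by Pre_.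
  let increasing := (category_changes.filter
      (fun p => p.2.lookup "trend" == some "increasing")).map (fun p => p.1)
  let decreasing := (category_changes.filter
      (fun p => p.2.lookup "trend" == some "decreasing")).map (fun p => p.1)
  let summary_parts : List String :=
    (if increasing.isEmpty then [] else ["증가 추세" ++ ": " ++ PySem.Str.join ", " (increasing.take 3)]) ++
    (if decreasing.isEmpty then [] else ["감소 추세" ++ ": " ++ PySem.Str.join ", " (decreasing.take 3)])
  if summary_parts.isEmpty then "안정적인 연구 분포 유지" else PySem.Str.join "; " summary_parts

-- ===== PORT B =====
def summarize_flow_changes_py_alt (category_changes : List (String × List (String × String))) : String :=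
  -- one bucketing pass: groups.setdefault(data['trend'], []).append(cat)
  let groups : PySem.Dict String (List String) :=
    category_changes.foldl
      (fun d p => d.modify ((p.2.lookup "trend").getD "") [] (fun l => l ++ [p.1]))
      PySem.Dict.empty
  -- then format the two buckets in a loop over (trend, label) pairs
  let summary_parts : List String :=
    [("increasing", "증가 추세"), ("decreasing", "감소 추세")].foldl
      (fun acc pr =>
        let cats := groups.getD pr.1 []
        if cats.isEmpty then acc
        else acc ++ [pr.2 ++ ": " ++ PySem.Str.join ", " (cats.take 3)])
      []
  if summary_parts.isEmpty then "안정적인 연구 분포 유지" else PySem.Str.join "; " summary_parts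

-- ===== PRECONDITION & SPEC =====
-- Pre_ excludes exactly the inputs on which Python A raises KeyError: some category's data dict has no 'trend' key.
def Pre_summarize_flow_changes_py (category_changes : List (String × List (String × String))) : Prop :=
  (category_changes.all (fun p => (p.2.lookup "trend").isSome)) = true
instance (category_changes : List (String × List (String × String))) : Decidable (Pre_summarize_flow_changes_py category_changes) := by unfold Pre_summarize_flow_changes_py; infer_instance
def pvWitness_summarize_flow_changes_py : (List (String × List (String × String))) :=
  [("nlp", [("trend", "increasing")]), ("cv", [("trend", "decreasing")])]
def Spec_summarize_flow_changes_py (category_changes : List (String × List (String × String))) (out : String) : Prop := out = summarize_flow_changes_py_alt category_changes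
instance (category_changes : List (String × List (String × String))) (out : String) : Decidable (Spec_summarize_flow_changes_py category_changes out) := by unfold Spec_summarize_flow_changes_py; infer_instance

-- ===== CLAIM (what is proved, stated in full; the proofs are below) =====
def Claim_equal_summarize_flow_changes_py : Prop := ∀ (category_changes : List (String × List (String × String))), Dom_summarize_flow_changes_py category_changes → Pre_summarize_flow_changes_py category_changes → Spec_summarize_flow_changes_py category_changes (summarize_flow_changes_py category_changes)

-- ===== LEMMAS AND PROOFS =====

-- the grouping fold's bucket at key t is the start bucket plus the categories whose trend maps to t
lemma group_getD (t : String) (cc : List (String × List (String × String)))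
    (d : PySem.Dict String (List String)) :
    (cc.foldl
      (fun d p => d.modify ((p.2.lookup "trend").getD "") [] (fun l => l ++ [p.1])) d).getD t []
    = d.getD t [] ++ (cc.filter
        (fun p => ((p.2.lookup "trend").getD "") == t)).map (fun p => p.1) := by
  induction cc generalizing d with
  | nil => simp
  | cons p cc ih =>
    simp only [List.foldl_cons, List.filter_cons]
    rw [ih]
    by_cases h : ((p.2.lookup "trend").getD "") = t
    · subst h
      simp [PySem.Dict.getD_modify_self]
    · simp [PySem.Dict.getD_modify, h]
      exact fun hh => absurd hh.symm h

-- the two filter predicates agree when the target trend is a non-empty string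
lemma pred_eq (t : String) (ht : t ≠ "") (o : Option String) :
    (o.getD "" == t) = (o == some t) := by
  cases o with
  | none => simp [Ne.symm ht]
  | some s => simp

-- ===== VERDICT (by name: the statement is the Claim_ definition above) =====
theorem summarize_flow_changes_py_spec : Claim_equal_summarize_flow_changes_py := by
  intro cc _ _
  show summarize_flow_changes_py cc = summarize_flow_changes_py_alt cc
  unfold summarize_flow_changes_py summarize_flow_changes_py_alt
  simp only [List.foldl_cons, List.foldl_nil, PySem.Dict.getD_empty,
    group_getD, List.nil_append]
  have e1 : (fun p : String × List (String × String) => ((p.2.lookup "trend").getD "" == "increasing"))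
      = (fun p : String × List (String × String) => (p.2.lookup "trend" == some "increasing")) :=
    funext fun p => pred_eq "increasing" (by decide) _
  have e2 : (fun p : String × List (String × String) => ((p.2.lookup "trend").getD "" == "decreasing"))
      = (fun p : String × List (String × String) => (p.2.lookup "trend" == some "decreasing")) :=
    funext fun p => pred_eq "decreasing" (by decide) _
  rw [e1, e2]
  by_cases hi : ((cc.filter (fun p => p.2.lookup "trend" == some "increasing")).map (fun p => p.1)).isEmpty <;>
  by_cases hd : ((cc.filter (fun p => p.2.lookup "trend" == some "decreasing")).map (fun p => p.1)).isEmpty <;>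
    simp [hi, hd]
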